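-- pv_equiv track=rewrite | github.com/BennoisCoding/SE_01-assessment | code_wars/team_dinner.py | check_flexibility
-- ===== SOURCE A (Python) =====
-- def check_flexibility(available_dates, dates_list):
--     """Check the flexibility of the most available days."""
--
--     flexibility_list = []
--
--     # Go through the flexiblity of available days each person gave that is also part of the most available day.
--     for date in available_dates:
--         flexibility = 0
--         for row in dates_list:
--             if date in row:
--                 flexibility += len(row)
--         flexibility_list.append(flexibility)
--
--     most_flexibility = max(flexibility_list)
--
--     # Check if there are multiple most flexible days. If so, go for the day that happens sooner.
--     if flexibility_list.count(most_flexibility) > 1: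
--         flexibility_indices = [index for (index, item) in enumerate(flexibility_list) if item == most_flexibility]
--
--         return flexibility_indices[0]
--
--     return flexibility_list.index(most_flexibility)
-- ===== SOURCE B (Python) =====
-- def check_flexibility(available_dates, dates_list):
--     """Check the flexibility of the most available days."""
--     weight = {}
--     for row in dates_list:
--         length = len(row)
--         for date in set(row):
--             weight[date] = weight.get(date, 0) + length
--     best = None
--     best_index = 0
--     for index, date in enumerate(available_dates):
--         score = weight.get(date, 0)
--         if best is None or score > best:
--             best = score
--             best_index = index
--     return best_index
-- ===== Notes on version B (the rewrite author's own statement) =====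
-- stated objective: faster
-- what changed: B builds a date->total-row-length dictionary in one pass over dates_list and then picks the first argmax of the available dates with a single running-max scan, instead of A's nested membership scan per available date followed by separate max/count/index passes over the score list.
import Mathlib
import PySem

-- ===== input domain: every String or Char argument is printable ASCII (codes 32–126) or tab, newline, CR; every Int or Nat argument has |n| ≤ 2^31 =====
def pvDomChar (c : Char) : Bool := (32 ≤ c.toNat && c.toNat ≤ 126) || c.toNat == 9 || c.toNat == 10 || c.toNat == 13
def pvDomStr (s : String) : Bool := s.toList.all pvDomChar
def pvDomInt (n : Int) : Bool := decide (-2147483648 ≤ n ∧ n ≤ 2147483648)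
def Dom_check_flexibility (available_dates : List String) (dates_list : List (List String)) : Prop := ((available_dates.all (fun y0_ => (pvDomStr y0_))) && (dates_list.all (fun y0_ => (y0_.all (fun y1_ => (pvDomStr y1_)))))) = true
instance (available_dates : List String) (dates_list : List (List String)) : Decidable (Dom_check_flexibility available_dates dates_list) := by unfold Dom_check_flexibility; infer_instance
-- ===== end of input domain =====

-- B replaces A's nested membership scan per available date (and its max/count/index passes)
-- by one dictionary pass over dates_list plus a single running-argmax scan (objective: faster).


-- ===== PORT A =====
def check_flexibility (available_dates : List String) (dates_list : List (List String)) : Int :=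
  let flexibility_list : List Int :=
    available_dates.foldl (fun acc date =>
      acc ++ [dates_list.foldl (fun flexibility row =>
        if row.contains date then flexibility + (row.length : Int) else flexibility) 0]) []
  match PySem.List.max? flexibility_list (fun x => x) with
  | none => 0  -- Python raises ValueError on max([]); excluded by Pre_
  | some most_flexibility =>
    if flexibility_list.count most_flexibility > 1 then
      match ((PySem.List.enumerate flexibility_list).filter
              (fun p => p.2 == most_flexibility)).map (fun p => p.1) with
      | [] => 0  -- unreachable: most_flexibility occurs in the list
      | i :: _ => i
    else
      match PySem.List.index? flexibility_list most_flexibility with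
      | none => 0  -- unreachable
      | some i => (i : Int)

-- ===== PORT B =====
def check_flexibility_alt (available_dates : List String) (dates_list : List (List String)) : Int :=
  let weight : PySem.Dict String Int :=
    dates_list.foldl (fun weight row =>
      (PySem.Set.ofList row).foldl
        (fun weight date => weight.insert date (weight.getD date 0 + (row.length : Int))) weight)
      PySem.Dict.empty
  ((PySem.List.enumerate available_dates).foldl
    (fun (st : Option Int × Int) p =>
      let score := weight.getD p.2 0
      match st.1 with
      | none => (some score, p.1)
      | some best => if score > best then (some score, p.1) else st)
    ((none : Option Int), (0 : Int))).2

-- ===== PRECONDITION & SPEC =====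
-- Pre_ excludes only empty available_dates, where A raises ValueError (max() of an empty sequence).
def Pre_check_flexibility (available_dates : List String) (dates_list : List (List String)) : Prop :=
  available_dates ≠ []
instance (available_dates : List String) (dates_list : List (List String)) : Decidable (Pre_check_flexibility available_dates dates_list) := by unfold Pre_check_flexibility; infer_instance

def pvWitness_check_flexibility : List String × List (List String) :=
  (["a", "b"], [["a", "b"], ["b"], ["c", "a"]])

def Spec_check_flexibility (available_dates : List String) (dates_list : List (List String)) (out : Int) : Prop := out = check_flexibility_alt available_dates dates_list
instance (available_dates : List String) (dates_list : List (List String)) (out : Int) : Decidable (Spec_check_flexibility available_dates dates_list out) := by unfold Spec_check_flexibility; infer_instance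

-- ===== CLAIM (what is proved, stated in full; the proofs are below) =====
def Claim_equal_check_flexibility : Prop := ∀ (available_dates : List String) (dates_list : List (List String)), Dom_check_flexibility available_dates dates_list → Pre_check_flexibility available_dates dates_list → Spec_check_flexibility available_dates dates_list (check_flexibility available_dates dates_list)

-- ===== LEMMAS AND PROOFS =====

def pvScore (dates_list : List (List String)) (date : String) : Int :=
  dates_list.foldl (fun flexibility row =>
    if row.contains date then flexibility + (row.length : Int) else flexibility) 0

theorem pv_inner (s : List String) (hs : s.Nodup) (u : PySem.Dict String Int) (L : Int) (d : String) :
    (s.foldl (fun u x => u.insert x (u.getD x 0 + L)) u).getD d 0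
      = u.getD d 0 + (if d ∈ s then L else 0) := by
  induction s generalizing u with
  | nil => simp
  | cons x s ih =>
    simp only [List.foldl_cons]
    rcases List.nodup_cons.mp hs with ⟨hx, hs'⟩
    rw [ih hs']
    by_cases h : d = x
    · subst h
      simp [PySem.Dict.getD_insert_self, hx]
    · rw [PySem.Dict.getD_insert_of_ne (hne := h)]
      simp [List.mem_cons, h]

theorem pv_weight (dl : List (List String)) (u : PySem.Dict String Int) (d : String) :
    (dl.foldl (fun w row =>
      (PySem.Set.ofList row).foldl
        (fun w date => w.insert date (w.getD date 0 + (row.length : Int))) w) u).getD d 0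
      = dl.foldl (fun f row => if row.contains d then f + (row.length : Int) else f) (u.getD d 0) := by
  induction dl generalizing u with
  | nil => rfl
  | cons row dl ih =>
    simp only [List.foldl_cons]
    rw [ih, pv_inner _ (PySem.Set.nodup_ofList row)]
    congr 1
    by_cases h : d ∈ row
    · simp [PySem.Set.mem_ofList, h]
    · simp [PySem.Set.mem_ofList, h]

def pvG (st : Option Int × Int) (p : Int × Int) : Option Int × Int :=
  match st.1 with
  | none => (some p.2, p.1)
  | some best => if p.2 > best then (some p.2, p.1) else st

theorem pv_bloop (l : List Int) (b i k : Int) :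
    (PySem.List.enumerate l k).foldl pvG (some b, i)
      = (some (l.foldl max b),
         if l.foldl max b = b then i else k + (l.idxOf (l.foldl max b) : Int)) := by
  induction l generalizing b i k with
  | nil => simp
  | cons x l ih =>
    rw [PySem.List.enumerate_cons]
    simp only [List.foldl_cons]
    by_cases hx : x > b
    · have hstep : pvG (some b, i) (k, x) = (some x, k) := by simp [pvG, hx]
      rw [hstep, ih, max_eq_right hx.le]
      have hxM : x ≤ l.foldl max x := (PySem.List.le_foldl_max l x).1
      have hMb : l.foldl max x ≠ b := by omega
      simp only [hMb, if_false]
      by_cases hMx : l.foldl max x = x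
      · simp [hMx]
      · have : (x == l.foldl max x) = false := by
          simp [Ne.symm hMx]
        simp [List.idxOf_cons, this, hMx]
        ring
    · have hstep : pvG (some b, i) (k, x) = (some b, i) := by simp [pvG, hx]
      rw [hstep, ih, max_eq_left (not_lt.mp hx)]
      by_cases hMb : l.foldl max b = b
      · simp [hMb]
      · have hbM : b ≤ l.foldl max b := (PySem.List.le_foldl_max l b).1
        have hxM : (x == l.foldl max b) = false := by
          have : x ≤ b := not_lt.mp hx
          have : x ≠ l.foldl max b := by omega
          simp [this]
        simp [hMb, List.idxOf_cons, hxM]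
        ring

theorem pv_conv (w : PySem.Dict String Int) (ad : List String) (k : Int) (st : Option Int × Int) :
    (PySem.List.enumerate ad k).foldl (fun st p =>
        match st.1 with
        | none => (some (w.getD p.2 0), p.1)
        | some best => if w.getD p.2 0 > best then (some (w.getD p.2 0), p.1) else st) st
      = (PySem.List.enumerate (ad.map fun d => w.getD d 0) k).foldl pvG st := by
  induction ad generalizing k st with
  | nil => rfl
  | cons x ad ih =>
    rw [List.map_cons, PySem.List.enumerate_cons, PySem.List.enumerate_cons]
    simp only [List.foldl_cons]
    rw [ih]
    rfl

theorem pv_filterhead (l : List Int) (m : Int) (hm : m ∈ l) : ∀ (k : Int),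
    (((PySem.List.enumerate l k).filter (fun p => p.2 == m)).map (fun p => p.1)).head?
      = some (k + (l.idxOf m : Int)) := by
  induction l with
  | nil => simp at hm
  | cons x l ih =>
    intro k
    rw [PySem.List.enumerate_cons]
    by_cases hx : x = m
    · subst hx
      simp
    · have hb : (x == m) = false := by simp [hx]
      have hm' : m ∈ l := by
        rcases List.mem_cons.mp hm with h | h
        · exact absurd h.symm hx
        · exact h
      simp only [List.filter_cons, hb, if_false, Bool.false_eq_true]
      rw [ih hm' (k + 1)]
      simp [List.idxOf_cons, hb]
      ring

theorem pv_index? (l : List Int) (m : Int) (hm : m ∈ l) :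
    PySem.List.index? l m = some (l.idxOf m) := by
  induction l with
  | nil => simp at hm
  | cons x l ih =>
    by_cases hx : x = m
    · subst hx
      rw [PySem.List.index?_cons_self]
      simp
    · have hm' : m ∈ l := by
        rcases List.mem_cons.mp hm with h | h
        · exact absurd h.symm hx
        · exact h
      rw [PySem.List.index?_cons_of_ne l hx, ih hm']
      have hb : (x == m) = false := by simp [hx]
      simp [List.idxOf_cons, hb]

theorem pv_A_char (d0 : String) (rest : List String) (dl : List (List String)) :
    check_flexibility (d0 :: rest) dl
      = (((d0 :: rest).map (pvScore dl)).idxOf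
          ((rest.map (pvScore dl)).foldl max (pvScore dl d0)) : Int) := by
  unfold check_flexibility
  have hfold : (d0 :: rest).foldl (fun acc date => acc ++ [dl.foldl (fun flexibility row =>
        if row.contains date then flexibility + (row.length : Int) else flexibility) 0]) []
      = (d0 :: rest).map (pvScore dl) := by
    rw [show (fun (acc : List Int) (date : String) => acc ++ [dl.foldl (fun flexibility row =>
          if row.contains date then flexibility + (row.length : Int) else flexibility) 0])
        = (fun acc date => acc ++ [pvScore dl date]) from rfl,
      PySem.List.foldl_append_singleton_eq_map, List.nil_append]
  simp only [hfold, List.map_cons]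
  rw [PySem.List.max?_id_cons]
  set M := (rest.map (pvScore dl)).foldl max (pvScore dl d0) with hM
  have hmem : M ∈ pvScore dl d0 :: rest.map (pvScore dl) :=
    PySem.List.max?_mem (by rw [PySem.List.max?_id_cons])
  by_cases hc : (pvScore dl d0 :: rest.map (pvScore dl)).count M > 1
  · simp only [hc, if_true]
    have hh := pv_filterhead _ M hmem 0
    cases hL : (((PySem.List.enumerate (pvScore dl d0 :: rest.map (pvScore dl)) 0).filter
        (fun p => p.2 == M)).map (fun p => p.1)) with
    | nil => rw [hL] at hh; simp at hh
    | cons a t =>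
      rw [hL] at hh
      simp only [List.head?_cons, Option.some_inj] at hh
      simp [hh]
  · simp only [hc, if_false]
    rw [pv_index? _ M hmem]

theorem pv_B_char (d0 : String) (rest : List String) (dl : List (List String)) :
    check_flexibility_alt (d0 :: rest) dl
      = (if (rest.map (pvScore dl)).foldl max (pvScore dl d0) = pvScore dl d0 then 0
         else 1 + (((rest.map (pvScore dl)).idxOf
                ((rest.map (pvScore dl)).foldl max (pvScore dl d0))) : Int)) := by
  unfold check_flexibility_alt
  set w : PySem.Dict String Int :=
    dl.foldl (fun weight row =>
      (PySem.Set.ofList row).foldl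
        (fun weight date => weight.insert date (weight.getD date 0 + (row.length : Int))) weight)
      PySem.Dict.empty with hw
  have hgetD : ∀ d, w.getD d 0 = pvScore dl d := by
    intro d
    rw [hw, pv_weight]
    simp [pvScore, PySem.Dict.getD_empty]
  rw [PySem.List.enumerate_cons]
  simp only [List.foldl_cons]
  rw [pv_conv]
  have hmapeq : (rest.map fun d => w.getD d 0) = rest.map (pvScore dl) := by
    simp only [hgetD]
  rw [hmapeq, hgetD, zero_add, pv_bloop]

theorem pv_main (ad : List String) (dl : List (List String)) (h : ad ≠ []) :
    check_flexibility ad dl = check_flexibility_alt ad dl := by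
  obtain ⟨d0, rest, rfl⟩ := List.exists_cons_of_ne_nil h
  rw [pv_A_char, pv_B_char]
  by_cases hM : (rest.map (pvScore dl)).foldl max (pvScore dl d0) = pvScore dl d0
  · simp [hM]
  · have hb : (pvScore dl d0 == (rest.map (pvScore dl)).foldl max (pvScore dl d0)) = false := by
      simp [Ne.symm hM]
    simp only [List.map_cons, List.idxOf_cons, hb, cond_false, hM, if_false]
    push_cast
    ring

-- ===== VERDICT (by name: the statement is the Claim_ definition above) =====
theorem check_flexibility_spec : Claim_equal_check_flexibility := by
  intro ad dl _ hpre
  unfold Spec_check_flexibility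
  exact pv_main ad dl hpre
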